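-- pv_equiv track=rewrite | github.com/matthiebl/aoc | 2023/11.py | smart_expand
-- ===== SOURCE A (Python) =====
-- def rotate(lst):
--     return [list(c) for c in zip(*lst[::-1])]
--
-- def smart_expand(data: list[list[str]]) -> list[list[str]]:
--     rows = []
--     i = 0
--     for row in data:
--         if row.count('#') == 0:
--             i += 1
--         rows.append(i)
--
--     rotated = rotate(data)
--     cols = []
--     i = 0
--     for row in rotated:
--         if row.count('#') == 0:
--             i += 1
--         cols.append(i)
--
--     return rows, cols
-- ===== SOURCE B (Python) =====
-- def smart_expand(data: list[list[str]]) -> list[list[str]]: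
--     rows = []
--     r = 0
--     for row in data:
--         if '#' not in row:
--             r += 1
--         rows.append(r)
--
--     width = min((len(row) for row in data), default=0)
--     cols = []
--     c = 0
--     for j in range(width):
--         if not any(row[j] == '#' for row in data):
--             c += 1
--         cols.append(c)
--
--     return rows, cols
-- ===== Notes on version B (the rewrite author's own statement) =====
-- stated objective: simpler
-- what changed: B drops the rotate/transpose step entirely: it computes the effective width as the minimum row length and sweeps columns left-to-right, testing each column in place with any(row[j] == '#'), instead of building a rotated grid and counting on its rows.
import Mathlib
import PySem

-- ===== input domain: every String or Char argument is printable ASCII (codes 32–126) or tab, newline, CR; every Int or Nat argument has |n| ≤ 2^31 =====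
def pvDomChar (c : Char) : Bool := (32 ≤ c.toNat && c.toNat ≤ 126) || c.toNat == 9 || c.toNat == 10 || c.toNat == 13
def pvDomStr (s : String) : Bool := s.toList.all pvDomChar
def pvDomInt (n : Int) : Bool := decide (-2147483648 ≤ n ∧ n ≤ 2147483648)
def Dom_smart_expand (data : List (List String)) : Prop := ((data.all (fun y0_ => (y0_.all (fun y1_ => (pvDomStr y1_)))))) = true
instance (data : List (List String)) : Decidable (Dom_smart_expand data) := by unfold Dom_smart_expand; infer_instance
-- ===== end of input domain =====

-- B avoids building the rotated grid: it scans each column in place (objective: simpler).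

-- ===== PORT A =====
-- width of zip(*ls): the minimum row length (zip truncates to the shortest argument)
def pyMinWidth (ls : List (List String)) : Nat :=
  match ls with
  | [] => 0
  | r :: rs => rs.foldl (fun m q => min m q.length) r.length

-- zip(*ls) with each tuple turned into a list: column j (j below the minimum
-- length) collects the j-th element of every row, in row order; exact for zip's
-- truncation-to-shortest semantics (filterMap keeps all entries since j is in range).
def pyZipStar (ls : List (List String)) : List (List String) :=
  match ls with
  | [] => []
  | _ :: _ => (List.range (pyMinWidth ls)).map (fun j => ls.filterMap (fun r => r[j]?))

def rotate (lst : List (List String)) : List (List String) := pyZipStar lst.reverse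

def smart_expand (data : List (List String)) : List Int × List Int :=
  let rows := (data.foldl (fun (st : List Int × Int) row =>
      let i := if row.count "#" = 0 then st.2 + 1 else st.2
      (st.1 ++ [i], i)) ([], 0)).1
  let rotated := rotate data
  let cols := (rotated.foldl (fun (st : List Int × Int) row =>
      let i := if row.count "#" = 0 then st.2 + 1 else st.2
      (st.1 ++ [i], i)) ([], 0)).1
  (rows, cols)

-- ===== PORT B =====
def smart_expand_alt (data : List (List String)) : List Int × List Int :=
  let rows := (data.foldl (fun (st : List Int × Int) row =>
      let r := if "#" ∈ row then st.2 else st.2 + 1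
      (st.1 ++ [r], r)) ([], 0)).1
  -- min((len(row) for row in data), default=0)
  let width := pyMinWidth data
  -- row[j] is always in range since j < width ≤ len(row); getD "" is a total guard
  let cols := ((List.range width).foldl (fun (st : List Int × Int) j =>
      let c := if data.any (fun row => row[j]?.getD "" == "#") then st.2 else st.2 + 1
      (st.1 ++ [c], c)) ([], 0)).1
  (rows, cols)

-- ===== PRECONDITION & SPEC =====
def Spec_smart_expand (data : List (List String)) (out : List Int × List Int) : Prop := out = smart_expand_alt data
instance (data : List (List String)) (out : List Int × List Int) : Decidable (Spec_smart_expand data out) := by unfold Spec_smart_expand; infer_instance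

-- ===== CLAIM (what is proved, stated in full; the proofs are below) =====
def Claim_equal_smart_expand : Prop := ∀ (data : List (List String)), Dom_smart_expand data → Spec_smart_expand data (smart_expand data)

-- ===== LEMMAS AND PROOFS =====

theorem pyZipStar_ne_nil (ls : List (List String)) (h : ls ≠ []) :
    pyZipStar ls = (List.range (pyMinWidth ls)).map (fun j => ls.filterMap (fun r => r[j]?)) := by
  cases ls with
  | nil => exact absurd rfl h
  | cons r rs => rfl

theorem getD_hash_iff (o : Option String) : (o.getD "" == "#") = true ↔ o = some "#" := by
  cases o <;> simp

theorem min?_reverse_nat (l : List Nat) : l.reverse.min? = l.min? := by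
  cases h : l.min? with
  | none =>
    rw [List.min?_eq_none_iff] at h
    simp [h]
  | some a =>
    rw [List.min?_eq_some_iff] at h ⊢
    exact ⟨List.mem_reverse.mpr h.1, fun b hb => h.2 b (List.mem_reverse.mp hb)⟩

theorem pyMinWidth_eq_min? (ls : List (List String)) :
    pyMinWidth ls = ((ls.map (·.length)).min?).getD 0 := by
  cases ls with
  | nil => rfl
  | cons r rs =>
    show rs.foldl (fun m q => min m q.length) r.length = (rs.map (·.length)).foldl min r.length
    rw [List.foldl_map]

theorem pyMinWidth_reverse (ls : List (List String)) : pyMinWidth ls.reverse = pyMinWidth ls := by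
  rw [pyMinWidth_eq_min?, pyMinWidth_eq_min?, List.map_reverse, min?_reverse_nat]

theorem rows_eq (data : List (List String)) :
    (data.foldl (fun (st : List Int × Int) row =>
      let i := if row.count "#" = 0 then st.2 + 1 else st.2
      (st.1 ++ [i], i)) ([], 0)) =
    (data.foldl (fun (st : List Int × Int) row =>
      let r := if "#" ∈ row then st.2 else st.2 + 1
      (st.1 ++ [r], r)) ([], 0)) := by
  apply PySem.List.foldl_congr_mem
  intro st row _
  by_cases h : "#" ∈ row <;> simp [h, List.count_eq_zero]

theorem cols_eq (data : List (List String)) :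
    ((rotate data).foldl (fun (st : List Int × Int) row =>
      let i := if row.count "#" = 0 then st.2 + 1 else st.2
      (st.1 ++ [i], i)) ([], 0)) =
    ((List.range (pyMinWidth data)).foldl (fun (st : List Int × Int) j =>
      let c := if data.any (fun row => row[j]?.getD "" == "#") then st.2 else st.2 + 1
      (st.1 ++ [c], c)) ([], 0)) := by
  cases hd : data with
  | nil => rfl
  | cons d ds =>
    rw [← hd]
    have hne : data.reverse ≠ [] := by simp [hd]
    unfold rotate
    rw [pyZipStar_ne_nil _ hne, List.foldl_map, pyMinWidth_reverse]
    apply PySem.List.foldl_congr_mem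
    intro st j _
    have hcond : ((data.reverse.filterMap (fun r => r[j]?)).count "#" = 0) ↔
        ¬ (data.any (fun row => row[j]?.getD "" == "#") = true) := by
      rw [List.count_eq_zero]
      simp only [List.mem_filterMap, List.any_eq_true, not_exists, List.mem_reverse, not_and]
      constructor
      · intro h row hrow hbe
        exact absurd (h row hrow) (fun hn => hn ((getD_hash_iff _).mp hbe))
      · intro h row hrow hsome
        exact h row hrow ((getD_hash_iff _).mpr hsome)
    have hcv : (if (data.reverse.filterMap (fun r => r[j]?)).count "#" = 0 then st.2 + 1 else st.2) =
        (if data.any (fun row => row[j]?.getD "" == "#") = true then st.2 else st.2 + 1) := by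
      by_cases ha : data.any (fun row => row[j]?.getD "" == "#") = true
      · rw [if_pos ha, if_neg (fun h0 => (hcond.mp h0) ha)]
      · rw [if_neg ha, if_pos (hcond.mpr ha)]
    show (_, _) = (_, _)
    rw [hcv]

-- ===== VERDICT (by name: the statement is the Claim_ definition above) =====
theorem smart_expand_spec : Claim_equal_smart_expand := by
  intro data _
  show _ = _
  unfold smart_expand smart_expand_alt
  exact congrArg₂ Prod.mk (congrArg Prod.fst (rows_eq data)) (congrArg Prod.fst (cols_eq data))
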